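-- pv_equiv track=rewrite | github.com/a-und-b/ComfyUI_AB_Wildcard | nodes.py | find_innermost_braces
-- ===== SOURCE A (Python) =====
-- def find_innermost_braces(text):
--     """
--     Find the position of the innermost {...} block.
--     Returns (start, end, content) or None if no braces found.
--     """
--     depth = 0
--     start = -1
--     innermost_start = -1
--     innermost_end = -1
--     max_depth = 0
--
--     for i, char in enumerate(text):
--         if char == '{':
--             if depth == 0:
--                 start = i
--             depth += 1
--             if depth > max_depth:
--                 max_depth = depth
--                 innermost_start = i
--         elif char == '}':
--             if depth > 0:
--                 depth -= 1
--                 if depth == max_depth - 1: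
--                     innermost_end = i
--                     # Found an innermost block
--                     content = text[innermost_start + 1:innermost_end]
--                     return (innermost_start, innermost_end + 1, content)
--
--     # If no nested braces, find first simple block
--     depth = 0
--     for i, char in enumerate(text):
--         if char == '{':
--             start = i
--             depth += 1
--         elif char == '}' and depth > 0:
--             depth -= 1
--             if depth == 0:
--                 content = text[start + 1:i]
--                 return (start, i + 1, content)
--
--     return None
-- ===== SOURCE B (Python) =====
-- def find_innermost_braces(text):
--     """
--     Find the position of the innermost {...} block.
--     Returns (start, end, content) or None if no braces found.
--     """
--     first_open = text.find('{')
--     if first_open == -1: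
--         return None
--     close = text.find('}', first_open)
--     if close == -1:
--         return None
--     open_pos = text.rfind('{', 0, close)
--     return (open_pos, close + 1, text[open_pos + 1:close])
-- ===== Notes on version B (the rewrite author's own statement) =====
-- stated objective: faster
-- what changed: A's two char-by-char depth-counting Python loops are replaced by three C-level string-search primitives: find the first opening brace, find the first closing brace after it, then rfind the nearest opening brace before that; no depth counter is kept.
import Mathlib
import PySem

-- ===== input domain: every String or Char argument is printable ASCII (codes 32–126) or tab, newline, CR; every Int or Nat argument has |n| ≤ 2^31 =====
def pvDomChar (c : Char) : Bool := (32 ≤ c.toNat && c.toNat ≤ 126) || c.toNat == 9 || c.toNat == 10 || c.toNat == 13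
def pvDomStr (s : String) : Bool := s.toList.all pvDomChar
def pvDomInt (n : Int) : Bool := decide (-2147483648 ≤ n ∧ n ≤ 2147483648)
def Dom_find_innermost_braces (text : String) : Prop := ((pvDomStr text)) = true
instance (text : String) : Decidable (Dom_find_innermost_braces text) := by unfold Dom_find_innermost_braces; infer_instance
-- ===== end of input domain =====

-- B replaces A's two char-by-char depth-counting scans by three string-search
-- primitives (find / find-from / rfind); measurably faster (C-level scans, no
-- per-character Python loop).

-- ===== PORT A =====
-- first loop of A: i is the enumerate index, state (depth, start, innermost_start,
-- innermost_end, max_depth); returns at the first '}' closing the deepest block so far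
def pvAloop1 (text : String) (cs : List Char) (i depth start istart iend maxd : Int) :
    Option (Int × Int × String) :=
  match cs with
  | [] => none
  | c :: rest =>
    if c = '{' then
      let start' := if depth = 0 then i else start
      let depth' := depth + 1
      if depth' > maxd then
        pvAloop1 text rest (i + 1) depth' start' i iend depth'
      else
        pvAloop1 text rest (i + 1) depth' start' istart iend maxd
    else if c = '}' then
      if depth > 0 then
        let depth' := depth - 1
        if depth' = maxd - 1 then
          some (istart, i + 1, PySem.Str.slice text (some (istart + 1)) (some i))
        else
          pvAloop1 text rest (i + 1) depth' start istart iend maxd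
      else
        pvAloop1 text rest (i + 1) depth start istart iend maxd
    else
      pvAloop1 text rest (i + 1) depth start istart iend maxd

-- second loop of A ("if no nested braces, find first simple block")
def pvAloop2 (text : String) (cs : List Char) (i depth start : Int) :
    Option (Int × Int × String) :=
  match cs with
  | [] => none
  | c :: rest =>
    if c = '{' then
      pvAloop2 text rest (i + 1) (depth + 1) i
    else if c = '}' ∧ depth > 0 then
      let depth' := depth - 1
      if depth' = 0 then
        some (start, i + 1, PySem.Str.slice text (some (start + 1)) (some i))
      else
        pvAloop2 text rest (i + 1) depth' start
    else
      pvAloop2 text rest (i + 1) depth start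

def find_innermost_braces (text : String) : Option (Int × Int × String) :=
  match pvAloop1 text text.toList 0 0 (-1) (-1) (-1) 0 with
  | some r => some r
  | none => pvAloop2 text text.toList 0 0 (-1)

-- ===== PORT B =====
def find_innermost_braces_alt (text : String) : Option (Int × Int × String) :=
  let first_open := PySem.Str.find text "{"
  if first_open = -1 then none
  else
    let close := PySem.Str.findFrom text "}" first_open none
    if close = -1 then none
    else
      let open_pos := PySem.Str.rfindFrom text "{" 0 (some close)
      some (open_pos, close + 1, PySem.Str.slice text (some (open_pos + 1)) (some close))

-- ===== PRECONDITION & SPEC =====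
def Spec_find_innermost_braces (text : String) (out : Option (Int × Int × String)) : Prop := out = find_innermost_braces_alt text
instance (text : String) (out : Option (Int × Int × String)) : Decidable (Spec_find_innermost_braces text out) := by unfold Spec_find_innermost_braces; infer_instance

-- ===== CLAIM (what is proved, stated in full; the proofs are below) =====
def Claim_equal_find_innermost_braces : Prop := ∀ (text : String), Dom_find_innermost_braces text → Spec_find_innermost_braces text (find_innermost_braces text)

-- ===== LEMMAS AND PROOFS =====

-- [c] is a prefix of l.drop j exactly when the element at j is c
theorem pvSinglePre (c : Char) (l : List Char) (j : Nat) :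
    ([c] <+: l.drop j) ↔ l[j]? = some c := by
  rw [List.cons_prefix_iff]
  constructor
  · rintro ⟨l', h, -⟩
    rw [← List.head?_drop, h]; rfl
  · intro h
    exact ⟨(l.drop j).tail,
      by rw [← List.head?_drop] at h; cases hd : l.drop j <;> simp_all, by simp⟩

-- first occurrence split
theorem pvFirstSplit {c : Char} {l : List Char} (h : c ∈ l) :
    ∃ p r, l = p ++ c :: r ∧ c ∉ p := by
  induction l with
  | nil => cases h
  | cons x xs ih =>
    by_cases hx : x = c
    · exact ⟨[], xs, by simp [hx], by simp⟩
    · have hxs : c ∈ xs := by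
        rcases List.mem_cons.1 h with h1 | h1
        · exact absurd h1.symm hx
        · exact h1
      rcases ih hxs with ⟨p, r, hpr, hnp⟩
      refine ⟨x :: p, r, by simp [hpr], ?_⟩
      intro hm
      rcases List.mem_cons.1 hm with h1 | h1
      · exact hx h1.symm
      · exact hnp h1

-- last occurrence split
theorem pvLastSplit {c : Char} {l : List Char} (h : c ∈ l) :
    ∃ p r, l = p ++ c :: r ∧ c ∉ r := by
  rcases pvFirstSplit (l := l.reverse) (c := c) (by simpa using h) with ⟨p, r, hpr, hnp⟩
  refine ⟨r.reverse, p.reverse, ?_, by simpa using hnp⟩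
  have := congrArg List.reverse hpr
  simpa using this

-- ---- A-side characterisations ----

-- loop1 ignores a block of characters containing no '{' while depth = 0 (maxd = 0)
theorem pvAloop1_skip (text : String) (pre rest : List Char) (hp : '{' ∉ pre)
    (i s is ie : Int) :
    pvAloop1 text (pre ++ rest) i 0 s is ie 0 =
      pvAloop1 text rest (i + pre.length) 0 s is ie 0 := by
  induction pre generalizing i with
  | nil => simp
  | cons c cr ih =>
    have hc : c ≠ '{' := fun he => hp (he ▸ List.mem_cons_self)
    have hcr : '{' ∉ cr := fun hm => hp (List.mem_cons_of_mem _ hm)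
    have key : pvAloop1 text (cr ++ rest) (i + 1) 0 s is ie 0 =
        pvAloop1 text rest (i + ((c :: cr).length : Int)) 0 s is ie 0 := by
      rw [ih hcr]; congr 1; simp only [List.length_cons]; push_cast; ring
    simp only [List.cons_append, pvAloop1, if_neg hc]
    split_ifs with h1 h2
    · exact absurd h2 (by omega)
    · exact key
    · exact key

-- if there is no '}' at all, loop1 returns none whatever the state
theorem pvAloop1_none (text : String) (cs : List Char) (h : '}' ∉ cs)
    (i d s is ie md : Int) : pvAloop1 text cs i d s is ie md = none := by
  induction cs generalizing i d s is ie md with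
  | nil => rfl
  | cons c cr ih =>
    have hc : c ≠ '}' := fun he => h (he ▸ List.mem_cons_self)
    have hcr : '}' ∉ cr := fun hm => h (List.mem_cons_of_mem _ hm)
    by_cases h1 : c = '{' <;>
      simp [pvAloop1, h1, hc, ih hcr]

-- index of the last '{' of m, where is is the index of the last '{' seen so far
-- and i the index of the first character of m (proof helper for loop1's climb)
def pvLastOpen (i is : Int) (m : List Char) : Int :=
  match m with
  | [] => is
  | c :: r => pvLastOpen (i + 1) (if c = '{' then i else is) r

theorem pvLastOpen_no (i is : Int) (m : List Char) (h : '{' ∉ m) :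
    pvLastOpen i is m = is := by
  induction m generalizing i with
  | nil => rfl
  | cons c r ih =>
    have hc : c ≠ '{' := fun he => h (he ▸ List.mem_cons_self)
    simp [pvLastOpen, hc, ih _ (fun hm => h (List.mem_cons_of_mem _ hm))]

theorem pvLastOpen_last (i is : Int) (a v : List Char) (h : '{' ∉ v) :
    pvLastOpen i is (a ++ '{' :: v) = i + a.length := by
  induction a generalizing i is with
  | nil => simp [pvLastOpen, pvLastOpen_no _ _ _ h]
  | cons c r ih => simp [pvLastOpen, ih]; ring

-- climbing through m (no '}') with depth = maxd = d > 0, then the closing '}'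
theorem pvAloop1_climb (text : String) (m t : List Char) (hm : '}' ∉ m)
    (i d s is ie : Int) (hd : 0 < d) :
    pvAloop1 text (m ++ '}' :: t) i d s is ie d =
      some (pvLastOpen i is m, i + m.length + 1,
        PySem.Str.slice text (some (pvLastOpen i is m + 1)) (some (i + m.length))) := by
  induction m generalizing i d s is with
  | nil =>
    simp only [List.nil_append, pvAloop1, if_neg (by decide : ¬ ('}' : Char) = '{'),
      if_pos hd, pvLastOpen]
    simp
  | cons c r ih =>
    have hc : c ≠ '}' := fun he => hm (he ▸ List.mem_cons_self)
    have hr : '}' ∉ r := fun h2 => hm (List.mem_cons_of_mem _ h2)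
    by_cases h1 : c = '{'
    · simp only [List.cons_append, pvAloop1, if_pos h1]
      rw [if_pos (by omega : d + 1 > d), ih hr _ _ _ _ (by omega)]
      simp only [pvLastOpen, if_pos h1, List.length_cons]
      push_cast
      rw [show i + 1 + (r.length : Int) = i + ((r.length : Int) + 1) from by ring]
    · simp only [List.cons_append, pvAloop1, if_neg h1, if_neg hc]
      rw [ih hr _ _ _ _ hd]
      simp only [pvLastOpen, if_neg h1, List.length_cons]
      push_cast
      rw [show i + 1 + (r.length : Int) = i + ((r.length : Int) + 1) from by ring]

-- loop2 analogues
theorem pvAloop2_skip (text : String) (pre rest : List Char) (hp : '{' ∉ pre)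
    (i s : Int) :
    pvAloop2 text (pre ++ rest) i 0 s = pvAloop2 text rest (i + pre.length) 0 s := by
  induction pre generalizing i with
  | nil => simp
  | cons c cr ih =>
    have hc : c ≠ '{' := fun he => hp (he ▸ List.mem_cons_self)
    have hcr : '{' ∉ cr := fun hm => hp (List.mem_cons_of_mem _ hm)
    simp only [List.cons_append, pvAloop2, if_neg hc,
      if_neg (by simp : ¬ (c = '}' ∧ (0:Int) > 0))]
    rw [ih hcr]; congr 1; simp only [List.length_cons]; push_cast; ring

theorem pvAloop2_none (text : String) (cs : List Char) (h : '}' ∉ cs)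
    (i d s : Int) : pvAloop2 text cs i d s = none := by
  induction cs generalizing i d s with
  | nil => rfl
  | cons c cr ih =>
    have hc : c ≠ '}' := fun he => h (he ▸ List.mem_cons_self)
    have hcr : '}' ∉ cr := fun hm => h (List.mem_cons_of_mem _ hm)
    by_cases h1 : c = '{' <;> simp [pvAloop2, h1, hc, ih hcr]

-- ---- B-side characterisations ----

theorem pvFind_not (c : Char) (cs : List Char) (h : c ∉ cs) :
    PySem.Chars.find cs [c] = -1 := by
  rw [PySem.Chars.find_eq_neg_one_iff]
  intro hin
  exact h ((List.singleton_infix_iff c cs).1 hin)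

theorem pvFind_first (c : Char) (p r : List Char) (hp : c ∉ p) :
    PySem.Chars.find (p ++ c :: r) [c] = (p.length : Int) := by
  have hmem : [c] <:+: (p ++ c :: r) :=
    (List.singleton_infix_iff c _).2 (by simp)
  have h0 : 0 ≤ PySem.Chars.find (p ++ c :: r) [c] :=
    (PySem.Chars.find_nonneg_iff _ _).2 hmem
  obtain ⟨hpre, hmin⟩ := PySem.Chars.find_spec h0
  rw [pvSinglePre] at hpre
  have hple : (PySem.Chars.find (p ++ c :: r) [c]).toNat ≤ p.length := by
    by_contra hlt
    exact (hmin p.length (by omega)) ((pvSinglePre c _ _).2 (by simp))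
  have hpge : ¬ (PySem.Chars.find (p ++ c :: r) [c]).toNat < p.length := by
    intro hlt
    rw [List.getElem?_append_left hlt] at hpre
    exact hp (by
      have := List.getElem?_eq_some_iff.1 hpre
      rcases this with ⟨hh, he⟩
      exact he ▸ List.getElem_mem _)
  omega

-- rfind.go: hit at j, nothing between j and k
theorem pvGo_hit (cs : List Char) (c : Char) (k j : Nat) (hj : j ≤ k)
    (hpre : cs[j]? = some c)
    (habove : ∀ i, j < i → i ≤ k → cs[i]? ≠ some c) :
    PySem.Chars.rfind.go cs [c] k = (j : Int) := by
  induction k with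
  | zero =>
    have : j = 0 := by omega
    subst this
    have : [c].isPrefixOf cs = true := by
      rw [List.isPrefixOf_iff_prefix]
      have := (pvSinglePre c cs 0).2 hpre
      simpa using this
    simp [PySem.Chars.rfind.go, this]
  | succ k ih =>
    by_cases hjk : j = k + 1
    · subst hjk
      have : [c].isPrefixOf (cs.drop (k + 1)) = true := by
        rw [List.isPrefixOf_iff_prefix]; exact (pvSinglePre c cs (k+1)).2 hpre
      simp [PySem.Chars.rfind.go, this]
    · have hne : cs[k+1]? ≠ some c := habove (k+1) (by omega) (le_refl _)
      have : [c].isPrefixOf (cs.drop (k + 1)) = false := by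
        rw [Bool.eq_false_iff]
        intro hT
        exact hne ((pvSinglePre c cs (k+1)).1 (List.isPrefixOf_iff_prefix.1 hT))
      simp only [PySem.Chars.rfind.go, this]
      exact ih (by omega) (fun i h1 h2 => habove i h1 (by omega))

theorem pvRfind_last (c : Char) (p r : List Char) (hr : c ∉ r) :
    PySem.Chars.rfind (p ++ c :: r) [c] = (p.length : Int) := by
  unfold PySem.Chars.rfind
  apply pvGo_hit
  · simp
  · simp
  · intro i h1 _ hc
    rw [List.getElem?_append_right (by omega)] at hc
    obtain ⟨j, hj⟩ : ∃ j, i - p.length = j + 1 := ⟨i - p.length - 1, by omega⟩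
    rw [hj, List.getElem?_cons_succ] at hc
    exact hr (List.mem_of_getElem? hc)

-- ===== main proof =====

theorem pvMain (text : String) :
    find_innermost_braces text = find_innermost_braces_alt text := by
  set cs := text.toList with hcs
  by_cases hob : '{' ∈ cs
  · rcases pvFirstSplit hob with ⟨p, r, hpr, hnp⟩
    by_cases hcb : '}' ∈ r
    · -- case (c): a '{' and a later '}'
      rcases pvFirstSplit hcb with ⟨m, t, hmt, hnm⟩
      subst hmt
      -- B side
      have hfind : PySem.Str.find text "{" = (p.length : Int) := by
        have := pvFind_first '{' p (m ++ '}' :: t) hnp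
        simpa [← hcs, hpr] using this
      have hclose : PySem.Str.findFrom text "}" (p.length : Int) none
          = ((p.length + 1 + m.length : Nat) : Int) := by
        have hk : p.length ≤ cs.length := by simp [hpr]
        have hstep := PySem.Chars.findFrom_natCast cs ['}'] p.length hk
        have hdrop : cs.drop p.length = '{' :: (m ++ '}' :: t) := by simp [hpr]
        have hfm : PySem.Chars.find (cs.drop p.length) ['}'] = ((m.length : Int) + 1) := by
          rw [hdrop]
          have h0 := pvFind_first '}' ('{' :: m) t (by
            intro hmem
            rcases List.mem_cons.1 hmem with h | h
            · exact absurd h (by decide)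
            · exact hnm h)
          simpa using h0
        rw [hfm] at hstep
        have hl : ("}" : String).toList = ['}'] := rfl
        simp only [PySem.Str.findFrom_eq, ← hcs, hl]
        rw [hstep, if_neg (by omega : ¬ ((m.length : Int) + 1 = -1))]
        push_cast; ring
      -- last '{' before close
      have hlast : ∃ (q : Nat) , PySem.Chars.rfind (p ++ '{' :: m) ['{'] = (q : Int) ∧
          pvLastOpen ((p.length : Int) + 1) (p.length : Int) m = (q : Int) := by
        by_cases hmo : '{' ∈ m
        · rcases pvLastSplit hmo with ⟨a, v, hav, hnv⟩
          refine ⟨p.length + 1 + a.length, ?_, ?_⟩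
          · have he : p ++ '{' :: m = (p ++ '{' :: a) ++ '{' :: v := by simp [hav]
            rw [he, pvRfind_last '{' _ _ hnv]
            simp only [List.length_append, List.length_cons]
            push_cast; ring
          · rw [hav, pvLastOpen_last _ _ _ _ hnv]; push_cast; ring
        · refine ⟨p.length, ?_, ?_⟩
          · rw [pvRfind_last '{' p m hmo]
          · rw [pvLastOpen_no _ _ _ hmo]
      rcases hlast with ⟨q, hrf, hlo⟩
      have hrfind : PySem.Str.rfindFrom text "{" 0 (some ((p.length + 1 + m.length : Nat) : Int))
          = (q : Int) := by
        simp only [PySem.Str.rfindFrom, PySem.Chars.rfindFrom]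
        rw [← hcs]
        have hl : ("{" : String).toList = ['{'] := rfl
        rw [hl]
        have hlen : cs.length = p.length + 1 + m.length + 1 + t.length := by
          simp only [hpr, List.length_append, List.length_cons]; omega
        have htake : cs.take (p.length + 1 + m.length) = p ++ '{' :: m := by
          rw [hpr]
          rw [show p ++ '{' :: (m ++ '}' :: t) = (p ++ '{' :: m) ++ '}' :: t by simp]
          rw [List.take_append_of_le_length (by simp only [List.length_append, List.length_cons]; omega)]
          exact List.take_of_length_le (by simp only [List.length_append, List.length_cons]; omega)
        have hA : ¬ ((cs.length : Int) < ((p.length + 1 + m.length : Nat) : Int)) := by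
          push_cast; omega
        have hB : ¬ (((p.length + 1 + m.length : Nat) : Int) < 0) := by push_cast; omega
        rw [if_neg hA, if_neg hB, if_neg (lt_irrefl (0 : Int)), if_neg hB]
        simp only [Int.toNat_natCast, Int.toNat_zero, List.drop_zero, htake, hrf]
        rw [if_neg (by omega : ¬ ((q : Int) = -1))]
        omega
      -- A side
      have hA : find_innermost_braces text =
          some ((q : Int), ((p.length + 1 + m.length : Nat) : Int) + 1,
            PySem.Str.slice text (some ((q : Int) + 1)) (some ((p.length + 1 + m.length : Nat) : Int))) := by
        unfold find_innermost_braces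
        rw [← hcs, hpr]
        rw [show p ++ '{' :: (m ++ '}' :: t) = p ++ ('{' :: (m ++ '}' :: t)) by simp]
        rw [pvAloop1_skip text p _ hnp]
        simp only [pvAloop1]
        rw [if_pos (by omega : (0:Int) + 1 > 0)]
        rw [pvAloop1_climb text m t hnm _ _ _ _ _ (by omega)]
        rw [show (0:Int) + p.length = (p.length : Int) by ring] at *
        rw [hlo]
        simp only [if_true]
        push_cast
        ring_nf
      rw [hA]
      unfold find_innermost_braces_alt
      rw [hfind, if_neg (by omega : ¬ ((p.length : Int) = -1)), hclose,
        if_neg (by push_cast; omega : ¬ (((p.length + 1 + m.length : Nat) : Int) = -1)), hrfind]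
    · -- case (b): '{' exists but no '}' after it
      have hA : find_innermost_braces text = none := by
        unfold find_innermost_braces
        rw [← hcs, hpr, pvAloop1_skip text p _ hnp, pvAloop2_skip text p _ hnp]
        simp [pvAloop1, pvAloop2, pvAloop1_none text r hcb, pvAloop2_none text r hcb]
      have hfind : PySem.Str.find text "{" = (p.length : Int) := by
        have := pvFind_first '{' p r hnp
        simpa [← hcs, hpr] using this
      have hclose : PySem.Str.findFrom text "}" (p.length : Int) none = -1 := by
        have hk : p.length ≤ cs.length := by simp [hpr]
        have := PySem.Chars.findFrom_natCast cs ['}'] p.length hk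
        have hdrop : cs.drop p.length = '{' :: r := by simp [hpr]
        have hfm : PySem.Chars.find (cs.drop p.length) ['}'] = -1 := by
          rw [hdrop]
          exact pvFind_not '}' _ (by
            intro hmem
            rcases List.mem_cons.1 hmem with h | h
            · exact absurd h (by decide)
            · exact hcb h)
        rw [hfm] at this
        have hl : ("}" : String).toList = ['}'] := rfl
        simp only [PySem.Str.findFrom_eq, ← hcs, hl]
        rw [this]; simp
      rw [hA]
      unfold find_innermost_braces_alt
      rw [hfind, if_neg (by omega : ¬ ((p.length : Int) = -1)), hclose, if_pos rfl]
  · -- case (a): no '{' at all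
    have hA : find_innermost_braces text = none := by
      unfold find_innermost_braces
      rw [← hcs]
      rw [show cs = cs ++ [] by simp, pvAloop1_skip text cs [] hob,
        pvAloop2_skip text cs [] hob]
      rfl
    have hfind : PySem.Str.find text "{" = -1 := by
      have := pvFind_not '{' cs hob
      simpa [← hcs] using this
    rw [hA]
    unfold find_innermost_braces_alt
    rw [hfind, if_pos rfl]

-- ===== VERDICT (by name: the statement is the Claim_ definition above) =====
theorem find_innermost_braces_spec : Claim_equal_find_innermost_braces := by
  intro text _
  unfold Spec_find_innermost_braces
  exact pvMain text
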